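-- pv_equiv track=rewrite | github.com/vberriche/poissoncoin | poissoncoin_keys.py | rot29
-- ===== SOURCE A (Python) =====
-- base58 = "123456789ABCDEFGHJKLMNPQRSTUVWXYZabcdefghijkmnopqrstuvwxyz"
--
-- def error_code(key):
-- 		s = 0
-- 		for c in key:
-- 			s += base58.index(c)
-- 		return (s%58)
--
-- def rot29(key):		# This will be the new standard of cryptography for cryptocurrencies!
-- 	key = key[:-1] # remove error code
-- 	key = key.replace('SecretPoisson-','')
-- 	key = key.replace('PublicPoisson-','')
--
-- 	new_key = ''
-- 	for c in key:
-- 		new_key += base58[(base58.index(c)+29)%58]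
--
-- 	s = error_code(new_key)
-- 	new_key += base58[s]
--
-- 	return new_key
-- ===== SOURCE B (Python) =====
-- base58 = "123456789ABCDEFGHJKLMNPQRSTUVWXYZabcdefghijkmnopqrstuvwxyz"
--
-- def rot29(key):
--     body = key[:-1].replace('SecretPoisson-', '').replace('PublicPoisson-', '')
--     out = []
--     s = 0
--     for c in body:
--         ni = (base58.index(c) + 29) % 58
--         out.append(base58[ni])
--         s += ni
--     out.append(base58[s % 58])
--     return ''.join(out)
-- ===== Notes on version B (the rewrite author's own statement) =====
-- stated objective: faster
-- what changed: Fuses A's two traversals (the rotation pass plus error_code's rescan of the rotated string) into one loop that appends each rotated character to a list and accumulates the checksum sum at the same time, joining once at the end instead of repeated string concatenation.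
import Mathlib
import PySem

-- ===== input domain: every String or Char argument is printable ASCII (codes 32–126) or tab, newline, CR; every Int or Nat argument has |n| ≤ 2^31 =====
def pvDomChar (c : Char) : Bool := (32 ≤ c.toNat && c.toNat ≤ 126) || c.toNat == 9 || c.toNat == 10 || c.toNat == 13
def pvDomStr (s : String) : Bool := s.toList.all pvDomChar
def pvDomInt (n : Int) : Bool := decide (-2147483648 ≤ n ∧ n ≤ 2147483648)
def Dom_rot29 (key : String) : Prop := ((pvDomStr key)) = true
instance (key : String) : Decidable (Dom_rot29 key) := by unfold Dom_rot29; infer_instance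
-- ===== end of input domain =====

-- B fuses A's rotation pass and error_code's rescan into one loop accumulating the checksum alongside; return value only, no speed claim.

-- shared module-level constant base58 and its .index / [] operations
def b58 : List Char := "123456789ABCDEFGHJKLMNPQRSTUVWXYZabcdefghijkmnopqrstuvwxyz".toList
-- base58.index(c); Python raises ValueError when c ∉ base58 — those inputs are outside Pre_rot29
def b58idx (c : Char) : Nat := (PySem.List.index? b58 c).getD 0
-- base58[n] for the computed in-range indices (always < 58 here)
def b58get (n : Nat) : Char := PySem.List.pyGetD b58 (n : Int) ' '

-- ===== PORT A =====
def errorCode (key : List Char) : Nat :=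
  (key.foldl (fun s c => s + b58idx c) 0) % 58

def rot29 (key : String) : String :=
  let k1 := PySem.List.slice key.toList none (some (-1))
  let k2 := PySem.Chars.replace k1 "SecretPoisson-".toList []
  let k3 := PySem.Chars.replace k2 "PublicPoisson-".toList []
  let newKey := k3.foldl (fun acc c => acc ++ [b58get ((b58idx c + 29) % 58)]) []
  let s := errorCode newKey
  String.ofList (newKey ++ [b58get s])

-- ===== PORT B =====
def rot29_alt (key : String) : String :=
  let body := PySem.Chars.replace
      (PySem.Chars.replace (PySem.List.slice key.toList none (some (-1))) "SecretPoisson-".toList [])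
      "PublicPoisson-".toList []
  let r := body.foldl
      (fun (st : List Char × Nat) c =>
        let ni := (b58idx c + 29) % 58
        (st.1 ++ [b58get ni], st.2 + ni)) ([], 0)
  String.ofList (r.1 ++ [b58get (r.2 % 58)])

-- ===== PRECONDITION & SPEC =====
-- Pre_ excludes exactly the keys whose body (after dropping the last char and deleting the two
-- marker substrings) contains a non-base58 character: there Python's str.index raises ValueError.
def Pre_rot29 (key : String) : Prop :=
  ((PySem.Chars.replace
      (PySem.Chars.replace (PySem.List.slice key.toList none (some (-1))) "SecretPoisson-".toList [])
      "PublicPoisson-".toList []).all (fun c => b58.contains c)) = true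
instance (key : String) : Decidable (Pre_rot29 key) := by unfold Pre_rot29; infer_instance
def pvWitness_rot29 : String := "abc1"
def Spec_rot29 (key : String) (out : String) : Prop := out = rot29_alt key
instance (key : String) (out : String) : Decidable (Spec_rot29 key out) := by unfold Spec_rot29; infer_instance

-- ===== CLAIM (what is proved, stated in full; the proofs are below) =====
def Claim_equal_rot29 : Prop := ∀ (key : String), Dom_rot29 key → Pre_rot29 key → Spec_rot29 key (rot29 key)

-- ===== LEMMAS AND PROOFS =====

-- per-character round trip: looking the rotated character back up yields the rotated index
theorem b58idx_b58get (n : Nat) (hn : n < 58) : b58idx (b58get n) = n := by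
  interval_cases n <;> decide

-- A's rotation loop is a map
theorem rotA_map (l : List Char) (a : List Char) :
    l.foldl (fun acc c => acc ++ [b58get ((b58idx c + 29) % 58)]) a
      = a ++ l.map (fun c => b58get ((b58idx c + 29) % 58)) := by
  induction l generalizing a with
  | nil => simp
  | cons c t ih => simp [List.foldl, ih]

-- B's fused loop computes the map together with the running sum of rotated indices
theorem rotB_pair (l : List Char) (a : List Char) (s : Nat) :
    l.foldl (fun (st : List Char × Nat) c =>
        let ni := (b58idx c + 29) % 58
        (st.1 ++ [b58get ni], st.2 + ni)) (a, s)
      = (a ++ l.map (fun c => b58get ((b58idx c + 29) % 58)),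
         s + (l.map (fun c => (b58idx c + 29) % 58)).sum) := by
  induction l generalizing a s with
  | nil => simp
  | cons c t ih => simp [List.foldl, ih]; omega

-- error_code of the rotated string = sum of the rotated indices (needs every source char ∈ base58)
theorem errsum (l : List Char) (h : ∀ c ∈ l, b58.contains c) (s : Nat) :
    (l.map (fun c => b58get ((b58idx c + 29) % 58))).foldl (fun s c => s + b58idx c) s
      = s + (l.map (fun c => (b58idx c + 29) % 58)).sum := by
  induction l generalizing s with
  | nil => simp
  | cons c t ih =>
    simp only [List.map_cons, List.foldl_cons, List.sum_cons]
    rw [b58idx_b58get _ (Nat.mod_lt _ (by omega)), ih (fun c hc => h c (by simp [hc]))]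
    omega

-- ===== VERDICT (by name: the statement is the Claim_ definition above) =====
theorem rot29_spec : Claim_equal_rot29 := by
  intro key _ hpre
  unfold Spec_rot29 rot29 rot29_alt errorCode
  simp only []
  rw [rotA_map, rotB_pair]
  simp only [List.nil_append, Nat.zero_add]
  rw [errsum _ (by intro c hc; exact List.all_eq_true.mp hpre c hc) 0]
  simp
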